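-- pv_equiv track=rewrite | github.com/rachelriemersma/comp-363-f25-week12 | max_flow.py | find_min_cut
-- ===== SOURCE A (Python) =====
-- def find_reachable(residual: list[list[int]], source: int) -> set[int]:
--     """
--     find all the verticies that are reachable from the source in the residual
--     Args:
--         residual: residual graph as adjacency matrix
--         source: the starting vertex
--     returns: set of vertex indices that can be reached from source
--     """
--     n = len(residual)
--     # start w source
--     reachable = set([source])
--     # verticies to explore
--     stack = [source]
--     while len(stack) > 0:
--         # vertex to explore
--         u = stack.pop()
--         # check neighbors and if we can reach v from u
--         for v in range(n):
--             if residual[u][v] > 0 and v not in reachable: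
--                 # its reachable and we need to explore it
--                 reachable.add(v)
--                 stack.append(v)
--     return reachable
--
-- def find_min_cut(graph: list[list[int]], residual: list[list[int]], source: int) -> list[tuple[int,int]]:
--     """
--     find the edges in the original graph to "cut"
--     args:
--         residual: residual graph as adjacency matrix
--         graph: original graph as adjacency matrix
--         source: the starting vertex
--     returns: list of edge tuples (the minimum cut)
--     """
--     n = len(graph)
--     # find the reachable verticies from the source
--     reachable = find_reachable(residual, source)
--     # the edges in the OG graph
--     min_cut = []
--     for u in range(n):
--         for v in range(n):
--             # edge between u and v where u is reachable and v is not
--             if graph[u][v] > 0 and u in reachable and v not in reachable: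
--                 min_cut.append((u, v))
--     return min_cut
-- ===== SOURCE B (Python) =====
-- def find_min_cut(graph: list[list[int]], residual: list[list[int]], source: int) -> list[tuple[int, int]]:
--     # Reachability by bounded fixpoint iteration over the current set: n unconditional
--     # rounds of "add every positive-residual successor of the whole set" (no DFS stack,
--     # no frontier, no changed flag); n rounds always suffice to reach the closure.
--     n = len(residual)
--     reachable = {source}
--     for _ in range(n):
--         reachable = reachable | {v for u in reachable for v in range(n) if residual[u][v] > 0}
--     m = len(graph)
--     return [(u, v) for u in range(m) for v in range(m)
--             if graph[u][v] > 0 and u in reachable and v not in reachable]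
-- ===== Notes on version B (the rewrite author's own statement) =====
-- stated objective: alternative
-- what changed: Reachability is computed by n unconditional fixpoint rounds that union the set with all positive-residual successors of the whole current set (no DFS stack, no frontier, no changed flag), and the cut is collected by a comprehension; A's stack-based DFS is gone.
-- outside the precondition, e.g. on find_min_cut([[0, 1], [0, 0]], [[0, 0], [0]], 0): A returns [(0, 1)], B returns [(0, 1)]
import Mathlib
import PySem

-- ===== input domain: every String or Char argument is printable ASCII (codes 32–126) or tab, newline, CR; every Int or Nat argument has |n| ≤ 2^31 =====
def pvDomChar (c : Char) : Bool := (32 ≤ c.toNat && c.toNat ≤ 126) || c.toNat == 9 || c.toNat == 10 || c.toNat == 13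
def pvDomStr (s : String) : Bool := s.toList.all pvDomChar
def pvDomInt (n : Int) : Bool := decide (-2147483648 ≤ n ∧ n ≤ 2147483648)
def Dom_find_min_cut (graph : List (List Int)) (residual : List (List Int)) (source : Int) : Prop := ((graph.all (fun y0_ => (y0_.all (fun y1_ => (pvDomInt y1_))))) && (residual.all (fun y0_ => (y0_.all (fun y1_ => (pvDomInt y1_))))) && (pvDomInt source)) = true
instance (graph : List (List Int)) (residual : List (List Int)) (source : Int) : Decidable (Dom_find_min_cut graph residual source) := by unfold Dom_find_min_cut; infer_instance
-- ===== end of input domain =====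

-- B replaces A's stack-based DFS reachability with n unconditional whole-set fixpoint rounds
-- (alternative decomposition, not faster); return values are proved equal on Pre_.

-- m[u][v], totalised with 0 / [] where Python would raise (those inputs are outside Pre_);
-- pyGet? gives Python's negative-index semantics for the row access.
def pvCell (m : List (List Int)) (u v : Int) : Int :=
  PySem.List.pyGetD ((PySem.List.pyGet? m u).getD []) v 0

-- `graph[u][v] > 0 and u in reachable and v not in reachable` (the cut test both Pythons share)
def pvCutP (graph : List (List Int)) (reachable : PySem.Set Int) (u v : Nat) : Bool :=
  decide (0 < pvCell graph (u : Int) (v : Int)) && PySem.Set.contains reachable (u : Int) && !(PySem.Set.contains reachable (v : Int))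

-- ===== PORT A =====
-- the body of A's `for v in range(n)` loop: add unseen positive-residual neighbours, push them
def pvExStep (residual : List (List Int)) (u : Int) (st : PySem.Set Int × List Int) (v : Nat) :
    PySem.Set Int × List Int :=
  if 0 < pvCell residual u (v : Int) ∧ (v : Int) ∉ st.1 then
    (PySem.Set.add st.1 (v : Int), (v : Int) :: st.2)
  else st

-- A's `while len(stack) > 0` DFS loop; the stack keeps its top at the HEAD (Python appends and
-- pops at the right end — same LIFO order).  The fuel n+1 never runs out: each push adds a new
-- vertex of range(n) to `reachable`, so the loop pops at most n+1 times.
def pvDfs (residual : List (List Int)) (n : Nat) :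
    Nat → PySem.Set Int → List Int → PySem.Set Int
  | _, reachable, [] => reachable
  | 0, reachable, _ :: _ => reachable
  | fuel + 1, reachable, u :: stack =>
      let st := (List.range n).foldl (pvExStep residual u) (reachable, stack)
      pvDfs residual n fuel st.1 st.2

def find_min_cut (graph : List (List Int)) (residual : List (List Int)) (source : Int) :
    List (Int × Int) :=
  let n := graph.length
  let reachable : PySem.Set Int :=
    pvDfs residual residual.length (residual.length + 1) (PySem.Set.ofList [source]) [source]
  (List.range n).foldl (fun acc u =>
    (List.range n).foldl (fun acc v =>
      if pvCutP graph reachable u v then acc ++ [((u : Int), (v : Int))] else acc) acc) []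

-- ===== PORT B =====
-- `{v for u in reachable for v in range(n) if residual[u][v] > 0}` as the generated list
-- (consumed only through the set union below, so set-iteration order cannot matter)
def pvGen (residual : List (List Int)) (n : Nat) (R : PySem.Set Int) : List Int :=
  R.flatMap (fun u =>
    (((List.range n).filter (fun v : Nat => decide (0 < pvCell residual u (v : Int)))).map
      (fun v : Nat => (v : Int)) : List Int))

-- one round: `reachable = reachable | {…}`
def pvGrow (residual : List (List Int)) (n : Nat) (R : PySem.Set Int) : PySem.Set Int :=
  PySem.Set.union R (pvGen residual n R)

-- `for _ in range(n): …` — k unconditional rounds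
def pvIter (residual : List (List Int)) (n : Nat) : Nat → PySem.Set Int → PySem.Set Int
  | 0, R => R
  | k + 1, R => pvIter residual n k (pvGrow residual n R)

def find_min_cut_alt (graph : List (List Int)) (residual : List (List Int)) (source : Int) :
    List (Int × Int) :=
  let n := residual.length
  let reachable : PySem.Set Int := pvIter residual n n (PySem.Set.ofList [source])
  let m := graph.length
  (List.range m).flatMap (fun u =>
    ((List.range m).filter (fun v => pvCutP graph reachable u v)).map
      (fun v : Nat => ((u : Int), (v : Int))))

-- ===== PRECONDITION & SPEC =====
-- Pre_ excludes exactly the inputs on which Python A raises IndexError: a source outside the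
-- valid (possibly negative) index range of a nonempty residual, and ragged matrices whose rows
-- are shorter than the matrix (the closed-form sufficient shape; a ragged row that merely
-- happens never to be indexed is also excluded, on such inputs A and B return the same value).
def Pre_find_min_cut (graph : List (List Int)) (residual : List (List Int)) (source : Int) : Prop :=
  (0 < residual.length → -(residual.length : Int) ≤ source ∧ source < residual.length) ∧
  (∀ row ∈ residual, residual.length ≤ row.length) ∧
  (∀ row ∈ graph, graph.length ≤ row.length)
instance (graph : List (List Int)) (residual : List (List Int)) (source : Int) : Decidable (Pre_find_min_cut graph residual source) := by unfold Pre_find_min_cut; infer_instance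

def pvWitness_find_min_cut : List (List Int) × List (List Int) × Int :=
  ([[0, 1], [0, 0]], [[0, 1], [0, 0]], 0)

def Spec_find_min_cut (graph : List (List Int)) (residual : List (List Int)) (source : Int) (out : List (Int × Int)) : Prop := out = find_min_cut_alt graph residual source
instance (graph : List (List Int)) (residual : List (List Int)) (source : Int) (out : List (Int × Int)) : Decidable (Spec_find_min_cut graph residual source out) := by unfold Spec_find_min_cut; infer_instance

-- ===== CLAIM (what is proved, stated in full; the proofs are below) =====
def Claim_equal_find_min_cut : Prop := ∀ (graph : List (List Int)) (residual : List (List Int)) (source : Int), Dom_find_min_cut graph residual source → Pre_find_min_cut graph residual source → Spec_find_min_cut graph residual source (find_min_cut graph residual source)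

-- ===== LEMMAS AND PROOFS =====

-- vertices reachable from `source` through positive cells, second step always landing in range(n)
inductive pvReach (residual : List (List Int)) (n : Nat) (source : Int) : Int → Prop
  | base : pvReach residual n source source
  | step (u : Int) (v : Nat) (hu : pvReach residual n source u) (hv : v < n)
      (he : 0 < pvCell residual u (v : Int)) : pvReach residual n source (v : Int)

-- number of members of range(n) currently in R (the progress measure of both loops)
def pvR (n : Nat) (R : List Int) : Nat :=
  ((Finset.range n).filter (fun v : Nat => (v : Int) ∈ R)).card

lemma pvR_le (n : Nat) (R : List Int) : pvR n R ≤ n := by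
  simpa [pvR] using Finset.card_filter_le (Finset.range n) (fun v : Nat => (v : Int) ∈ R)

lemma pvR_add_new (n : Nat) {R : List Int} {v : Nat} (hv : v < n) (hnew : (v : Int) ∉ R) :
    pvR n (PySem.Set.add R (v : Int)) = pvR n R + 1 := by
  rw [PySem.Set.add_of_not_mem hnew]
  unfold pvR
  have h : (Finset.range n).filter (fun w : Nat => (w : Int) ∈ R ++ [(v : Int)]) =
      insert v ((Finset.range n).filter (fun w : Nat => (w : Int) ∈ R)) := by
    ext w
    simp only [Finset.mem_filter, Finset.mem_insert, Finset.mem_range, List.mem_append,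
      List.mem_singleton, Nat.cast_inj]
    constructor
    · rintro ⟨hw, h | h⟩
      · exact Or.inr ⟨hw, h⟩
      · exact Or.inl h
    · rintro (rfl | ⟨hw, h⟩)
      · exact ⟨hv, Or.inr rfl⟩
      · exact ⟨hw, Or.inl h⟩
  rw [h, Finset.card_insert_of_notMem (by simp [hnew])]

-- ----- A side -----

lemma explore_spec (residual : List (List Int)) (u : Int) (n : Nat) (L : List Nat)
    (hL : ∀ v ∈ L, v < n) (R s : List Int) :
    (∀ x ∈ R, x ∈ (L.foldl (pvExStep residual u) (R, s)).1) ∧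
    (∀ x ∈ (L.foldl (pvExStep residual u) (R, s)).1,
        x ∈ R ∨ ∃ v ∈ L, x = (v : Int) ∧ 0 < pvCell residual u (v : Int)) ∧
    (∀ x ∈ (L.foldl (pvExStep residual u) (R, s)).2,
        x ∈ s ∨ x ∈ (L.foldl (pvExStep residual u) (R, s)).1) ∧
    (∀ x ∈ (L.foldl (pvExStep residual u) (R, s)).1, x ∉ R →
        x ∈ (L.foldl (pvExStep residual u) (R, s)).2) ∧
    (∀ v ∈ L, 0 < pvCell residual u (v : Int) →
        (v : Int) ∈ (L.foldl (pvExStep residual u) (R, s)).1) ∧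
    ((L.foldl (pvExStep residual u) (R, s)).2.length +
        (n - pvR n (L.foldl (pvExStep residual u) (R, s)).1) ≤ s.length + (n - pvR n R)) ∧
    (∀ x ∈ s, x ∈ (L.foldl (pvExStep residual u) (R, s)).2) := by
  induction L generalizing R s with
  | nil =>
    refine ⟨fun x hx => hx, fun x hx => Or.inl hx, fun x hx => Or.inl hx,
      fun x hx hnx => absurd hx hnx, fun v hv => absurd hv (by simp), le_refl _,
      fun x hx => hx⟩
  | cons v L ih =>
    have hv : v < n := hL v (by simp)
    have hL' : ∀ w ∈ L, w < n := fun w hw => hL w (by simp [hw])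
    simp only [List.foldl_cons]
    rw [show pvExStep residual u (R, s) v =
        if 0 < pvCell residual u (v : Int) ∧ (v : Int) ∉ R then
          (PySem.Set.add R (v : Int), (v : Int) :: s) else (R, s) from rfl]
    split_ifs with hc
    · obtain ⟨hcell, hnew⟩ := hc
      obtain ⟨a, b, c, d, e, f, g⟩ := ih hL' (PySem.Set.add R (v : Int)) ((v : Int) :: s)
      refine ⟨?_, ?_, ?_, ?_, ?_, ?_, ?_⟩
      · intro x hx; exact a x ((PySem.Set.mem_add _ _ _).2 (Or.inl hx))
      · intro x hx
        rcases b x hx with hxA | ⟨w, hw, rfl, hcw⟩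
        · rcases (PySem.Set.mem_add _ _ _).1 hxA with hxR | rfl
          · exact Or.inl hxR
          · exact Or.inr ⟨v, by simp, rfl, hcell⟩
        · exact Or.inr ⟨w, by simp [hw], rfl, hcw⟩
      · intro x hx
        rcases c x hx with hxs | hxm
        · rcases List.mem_cons.1 hxs with h | h
          · exact Or.inr (by rw [h]; exact a _ ((PySem.Set.mem_add _ _ _).2 (Or.inr rfl)))
          · exact Or.inl h
        · exact Or.inr hxm
      · intro x hx hnxR
        by_cases hxa : x ∈ PySem.Set.add R (v : Int)
        · rcases (PySem.Set.mem_add _ _ _).1 hxa with hxR | rfl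
          · exact absurd hxR hnxR
          · exact g _ (by simp)
        · exact d x hx hxa
      · intro w hw hcw
        rcases List.mem_cons.1 hw with h | h
        · rw [h]; exact a _ ((PySem.Set.mem_add _ _ _).2 (Or.inr rfl))
        · exact e w h hcw
      · have hadd := pvR_add_new n hv hnew
        have hle := pvR_le n (PySem.Set.add R (v : Int))
        have := f
        simp only [List.length_cons] at this ⊢
        omega
      · intro x hx; exact g x (by simp [hx])
    · obtain ⟨a, b, c, d, e, f, g⟩ := ih hL' R s
      refine ⟨a, ?_, c, d, ?_, f, g⟩
      · intro x hx
        rcases b x hx with hxR | ⟨w, hw, rfl, hcw⟩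
        · exact Or.inl hxR
        · exact Or.inr ⟨w, by simp [hw], rfl, hcw⟩
      · intro w hw hcw
        rcases List.mem_cons.1 hw with h | h
        · subst h
          have hvR : (w : Int) ∈ R := by
            by_contra hnot
            exact hc ⟨hcw, hnot⟩
          exact a _ hvR
        · exact e w h hcw

lemma dfs_spec (residual : List (List Int)) (n : Nat) (source : Int) :
    ∀ (fuel : Nat) (R s : List Int),
    (∀ x ∈ R, pvReach residual n source x) →
    (∀ x ∈ s, x ∈ R) →
    (∀ x ∈ R, x ∉ s → ∀ v : Nat, v < n → 0 < pvCell residual x (v : Int) → (v : Int) ∈ R) →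
    s.length + (n - pvR n R) ≤ fuel →
    (∀ x ∈ R, x ∈ pvDfs residual n fuel R s) ∧
    (∀ x ∈ pvDfs residual n fuel R s, pvReach residual n source x) ∧
    (∀ x ∈ pvDfs residual n fuel R s, ∀ v : Nat, v < n →
        0 < pvCell residual x (v : Int) → (v : Int) ∈ pvDfs residual n fuel R s) := by
  intro fuel
  induction fuel with
  | zero =>
    intro R s hsound hstack hclosed hm
    cases s with
    | nil =>
      refine ⟨fun x hx => hx, hsound, ?_⟩
      intro x hx v hv he
      exact hclosed x hx (by simp) v hv he
    | cons u rest =>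
      exfalso
      simp only [List.length_cons] at hm
      omega
  | succ fuel ih =>
    intro R s hsound hstack hclosed hm
    cases s with
    | nil =>
      refine ⟨fun x hx => hx, hsound, ?_⟩
      intro x hx v hv he
      exact hclosed x hx (by simp) v hv he
    | cons u rest =>
      obtain ⟨a, b, c, d, e, f, g⟩ :=
        explore_spec residual u n (List.range n) (fun w hw => List.mem_range.1 hw) R rest
      have hru : u ∈ R := hstack u (by simp)
      have hsound' : ∀ x ∈ ((List.range n).foldl (pvExStep residual u) (R, rest)).1,
          pvReach residual n source x := by
        intro x hx
        rcases b x hx with hxR | ⟨v, hvL, rfl, hcell⟩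
        · exact hsound x hxR
        · exact pvReach.step u v (hsound u hru) (List.mem_range.1 hvL) hcell
      have hstack' : ∀ x ∈ ((List.range n).foldl (pvExStep residual u) (R, rest)).2,
          x ∈ ((List.range n).foldl (pvExStep residual u) (R, rest)).1 := by
        intro x hx
        rcases c x hx with hxs | hxm
        · exact a x (hstack x (by simp [hxs]))
        · exact hxm
      have hclosed' : ∀ x ∈ ((List.range n).foldl (pvExStep residual u) (R, rest)).1,
          x ∉ ((List.range n).foldl (pvExStep residual u) (R, rest)).2 →
          ∀ v : Nat, v < n → 0 < pvCell residual x (v : Int) →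
          (v : Int) ∈ ((List.range n).foldl (pvExStep residual u) (R, rest)).1 := by
        intro x hx hnx v hv hcell
        by_cases hxR : x ∈ R
        · by_cases hxu : x = u
          · subst hxu
            exact e v (List.mem_range.2 hv) hcell
          · have hxrest : x ∉ rest := fun hr => hnx (g x hr)
            exact a _ (hclosed x hxR (by simp [hxu, hxrest]) v hv hcell)
        · exact absurd (d x hx hxR) hnx
      have hm' : ((List.range n).foldl (pvExStep residual u) (R, rest)).2.length +
          (n - pvR n ((List.range n).foldl (pvExStep residual u) (R, rest)).1) ≤ fuel := by
        simp only [List.length_cons] at hm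
        omega
      have hres := ih _ _ hsound' hstack' hclosed' hm'
      have hdef : pvDfs residual n (fuel + 1) R (u :: rest) =
          pvDfs residual n fuel ((List.range n).foldl (pvExStep residual u) (R, rest)).1
            ((List.range n).foldl (pvExStep residual u) (R, rest)).2 := rfl
      rw [hdef]
      exact ⟨fun x hx => hres.1 _ (a x hx), hres.2.1, hres.2.2⟩

-- membership in A's reachable set ↔ pvReach
lemma dfs_main (residual : List (List Int)) (source : Int) :
    ∀ x, x ∈ pvDfs residual residual.length (residual.length + 1)
        (PySem.Set.ofList [source]) [source] ↔
      pvReach residual residual.length source x := by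
  have hofl : ∀ y, y ∈ PySem.Set.ofList [source] ↔ y = source := by
    intro y
    rw [PySem.Set.mem_ofList]
    simp
  obtain ⟨ha, hb, hc⟩ := dfs_spec residual residual.length source (residual.length + 1)
    (PySem.Set.ofList [source]) [source]
    (by intro x hx; rw [(hofl x).1 hx]; exact pvReach.base)
    (by intro x hx; simp at hx; rw [hx]; exact (hofl source).2 rfl)
    (by
      intro x hx hnx
      exact absurd (by simp [(hofl x).1 hx]) hnx)
    (by
      have := Nat.sub_le residual.length (pvR residual.length (PySem.Set.ofList [source]))
      simp only [List.length_singleton]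
      omega)
  intro x
  constructor
  · exact hb x
  · intro hx
    induction hx with
    | base => exact ha source ((hofl source).2 rfl)
    | step u v hu hv he ihu => exact hc u ihu v hv he

-- ----- B side -----

lemma mem_gen (residual : List (List Int)) (n : Nat) (R : PySem.Set Int) (x : Int) :
    x ∈ pvGen residual n R ↔
      ∃ u ∈ R, ∃ v : Nat, v < n ∧ x = (v : Int) ∧ 0 < pvCell residual u (v : Int) := by
  unfold pvGen
  simp only [List.mem_flatMap, List.mem_map, List.mem_filter, List.mem_range,
    decide_eq_true_eq]
  constructor
  · rintro ⟨u, hu, v, ⟨hv, hc⟩, rfl⟩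
    exact ⟨u, hu, v, hv, rfl, hc⟩
  · rintro ⟨u, hu, v, hv, rfl, hc⟩
    exact ⟨u, hu, v, ⟨hv, hc⟩, rfl⟩

lemma mem_grow (residual : List (List Int)) (n : Nat) (R : PySem.Set Int) (x : Int) :
    x ∈ pvGrow residual n R ↔ x ∈ R ∨ x ∈ pvGen residual n R := by
  unfold pvGrow
  exact PySem.Set.mem_union R (pvGen residual n R) x

lemma iter_mono (residual : List (List Int)) (n : Nat) :
    ∀ (k : Nat) (R : PySem.Set Int) (x : Int), x ∈ R → x ∈ pvIter residual n k R := by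
  intro k
  induction k with
  | zero => intro R x hx; exact hx
  | succ k ih =>
    intro R x hx
    exact ih _ x ((mem_grow residual n R x).2 (Or.inl hx))

lemma iter_sound (residual : List (List Int)) (n : Nat) (source : Int) :
    ∀ (k : Nat) (R : PySem.Set Int),
    (∀ x ∈ R, pvReach residual n source x) →
    ∀ x ∈ pvIter residual n k R, pvReach residual n source x := by
  intro k
  induction k with
  | zero => intro R h x hx; exact h x hx
  | succ k ih =>
    intro R h
    refine ih _ ?_
    intro x hx
    rcases (mem_grow residual n R x).1 hx with hxR | hxG
    · exact h x hxR
    · obtain ⟨u, hu, v, hv, rfl, hc⟩ := (mem_gen residual n R x).1 hxG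
      exact pvReach.step u v (h u hu) hv hc

-- closure predicate of the proofs (not part of either port)
def pvClosed (residual : List (List Int)) (n : Nat) (S : PySem.Set Int) : Prop :=
  ∀ u ∈ S, ∀ v : Nat, v < n → 0 < pvCell residual u (v : Int) → (v : Int) ∈ S

-- membership-equal closed inputs are fixed by every further round
lemma iter_stable (residual : List (List Int)) (n : Nat) (R : PySem.Set Int)
    (hcl : pvClosed residual n R) :
    ∀ (k : Nat) (S : PySem.Set Int), (∀ x, x ∈ S ↔ x ∈ R) →
      ∀ x, x ∈ pvIter residual n k S ↔ x ∈ R := by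
  intro k
  induction k with
  | zero => intro S h x; exact h x
  | succ k ih =>
    intro S h
    refine ih _ ?_
    intro x
    rw [mem_grow]
    constructor
    · rintro (hx | hx)
      · exact (h x).1 hx
      · obtain ⟨u, hu, v, hv, rfl, hc⟩ := (mem_gen residual n S x).1 hx
        exact hcl u ((h u).1 hu) v hv hc
    · intro hx
      exact Or.inl ((h x).2 hx)

lemma mem_of_pvR_eq (n : Nat) {R S : List Int} (hsub : ∀ x ∈ R, x ∈ S)
    (hcard : pvR n S ≤ pvR n R)
    (hshape : ∀ x ∈ S, x ∈ R ∨ ∃ v : Nat, v < n ∧ x = (v : Int)) :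
    ∀ x ∈ S, x ∈ R := by
  have hA : (Finset.range n).filter (fun v : Nat => (v : Int) ∈ R) =
      (Finset.range n).filter (fun v : Nat => (v : Int) ∈ S) := by
    apply Finset.eq_of_subset_of_card_le
    · intro v hv
      rw [Finset.mem_filter] at hv ⊢
      exact ⟨hv.1, hsub _ hv.2⟩
    · exact hcard
  intro x hx
  rcases hshape x hx with h | ⟨v, hv, rfl⟩
  · exact h
  · have hvS : v ∈ (Finset.range n).filter (fun w : Nat => (w : Int) ∈ S) := by
      rw [Finset.mem_filter]
      exact ⟨Finset.mem_range.2 hv, hx⟩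
    rw [← hA] at hvS
    exact (Finset.mem_filter.1 hvS).2

lemma iter_closed (residual : List (List Int)) (n : Nat) :
    ∀ (k : Nat) (R : PySem.Set Int), n ≤ pvR n R + k →
      pvClosed residual n (pvIter residual n k R) := by
  intro k
  induction k with
  | zero =>
    intro R hm
    have hall : ∀ v : Nat, v < n → (v : Int) ∈ R := by
      have hle := pvR_le n R
      have heq : pvR n R = n := by omega
      intro v hv
      have hfull : (Finset.range n).filter (fun w : Nat => (w : Int) ∈ R) = Finset.range n := by
        apply Finset.eq_of_subset_of_card_le (Finset.filter_subset _ _)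
        rw [Finset.card_range]
        exact le_of_eq heq.symm
      have hvmem : v ∈ (Finset.range n).filter (fun w : Nat => (w : Int) ∈ R) := by
        rw [hfull]; exact Finset.mem_range.2 hv
      exact (Finset.mem_filter.1 hvmem).2
    intro u _ v hv _
    exact hall v hv
  | succ k ih =>
    intro R hm
    have hsub : ∀ x ∈ R, x ∈ pvGrow residual n R :=
      fun x hx => (mem_grow residual n R x).2 (Or.inl hx)
    by_cases hc : pvR n (pvGrow residual n R) ≤ pvR n R
    · -- the round added no new range member: memberships coincide, R is already closed
      have hmemEq : ∀ x, x ∈ pvGrow residual n R ↔ x ∈ R := by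
        intro x
        constructor
        · intro hx
          refine mem_of_pvR_eq n hsub hc ?_ x hx
          intro y hy
          rcases (mem_grow residual n R y).1 hy with h | h
          · exact Or.inl h
          · obtain ⟨u, _, v, hv, rfl, _⟩ := (mem_gen residual n R y).1 h
            exact Or.inr ⟨v, hv, rfl⟩
        · exact hsub x
      have hcl : pvClosed residual n R := by
        intro u hu v hv hcell
        refine (hmemEq _).1 ?_
        exact (mem_grow residual n R _).2 (Or.inr ((mem_gen residual n R _).2
          ⟨u, hu, v, hv, rfl, hcell⟩))
      have hstab := iter_stable residual n R hcl k (pvGrow residual n R) hmemEq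
      intro u hu v hv hcell
      exact (hstab _).2 (hcl u ((hstab u).1 hu) v hv hcell)
    · -- strictly more range members: the fuel argument
      have hlt : pvR n R < pvR n (pvGrow residual n R) := lt_of_not_ge hc
      exact ih (pvGrow residual n R) (by omega)

-- membership in B's reachable set ↔ pvReach
lemma iter_main (residual : List (List Int)) (source : Int) :
    ∀ x, x ∈ pvIter residual residual.length residual.length (PySem.Set.ofList [source]) ↔
      pvReach residual residual.length source x := by
  have hofl : ∀ y, y ∈ PySem.Set.ofList [source] ↔ y = source := by
    intro y
    rw [PySem.Set.mem_ofList]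
    simp
  have hcl := iter_closed residual residual.length residual.length (PySem.Set.ofList [source])
    (by omega)
  intro x
  constructor
  · exact iter_sound residual residual.length source residual.length _
      (by intro y hy; rw [(hofl y).1 hy]; exact pvReach.base) x
  · intro hx
    induction hx with
    | base =>
      exact iter_mono residual residual.length residual.length _ source ((hofl source).2 rfl)
    | step u v hu hv he ihu => exact hcl u ihu v hv he

-- ===== VERDICT (by name: the statement is the Claim_ definition above) =====
theorem find_min_cut_spec : Claim_equal_find_min_cut := by
  intro graph residual source _hdom _hpre
  have hmem : ∀ x, x ∈ pvDfs residual residual.length (residual.length + 1)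
      (PySem.Set.ofList [source]) [source] ↔
      x ∈ pvIter residual residual.length residual.length (PySem.Set.ofList [source]) :=
    fun x => (dfs_main residual source x).trans (iter_main residual source x).symm
  have hcont : ∀ y : Int,
      PySem.Set.contains (pvDfs residual residual.length (residual.length + 1)
        (PySem.Set.ofList [source]) [source]) y =
      PySem.Set.contains (pvIter residual residual.length residual.length
        (PySem.Set.ofList [source])) y := by
    intro y
    rw [Bool.eq_iff_iff, PySem.Set.contains_iff, PySem.Set.contains_iff]
    exact hmem y
  have hP : ∀ u v : Nat,
      pvCutP graph (pvDfs residual residual.length (residual.length + 1)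
        (PySem.Set.ofList [source]) [source]) u v =
      pvCutP graph (pvIter residual residual.length residual.length
        (PySem.Set.ofList [source])) u v := by
    intro u v
    unfold pvCutP
    rw [hcont, hcont]
  unfold Spec_find_min_cut find_min_cut find_min_cut_alt
  simp only [PySem.List.foldl_append_if, PySem.List.foldl_append_eq_flatMap, List.nil_append]
  congr 1
  funext u
  rw [List.filter_congr (fun v _ => hP u v)]
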